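-- pv_equiv track=rewrite | github.com/righthand0521/LeetCode | src/2064.py | canDistribute
-- ===== SOURCE A (Python) =====
-- from typing import List, Optional
--
-- def canDistribute(x: int, quantities: List[int], n: int) -> bool:
--     retVal = False
--
--     quantitiesSize = len(quantities)
--
--     i = 0
--     remaining = quantities[i]
--     for _ in range(n):
--         if remaining > x:
--             remaining -= x
--             continue
--
--         i += 1
--         if i == quantitiesSize:
--             retVal = True
--             break
--         remaining = quantities[i]
--
--     return retVal
-- ===== SOURCE B (Python) =====
-- def canDistribute(x, quantities, n):
--     total = 0
--     for q in quantities: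
--         if q <= x:
--             total += 1
--         elif x <= 0:
--             return False
--         else:
--             total += -(-q // x)
--     return total <= n
-- ===== Notes on version B (the rewrite author's own statement) =====
-- stated objective: alternative
-- what changed: A simulates the distribution store by store (one loop iteration per store, up to n iterations); B computes the number of stores each product needs in closed form (ceiling division) in a single pass over the products and compares the sum with n.
import Mathlib
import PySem

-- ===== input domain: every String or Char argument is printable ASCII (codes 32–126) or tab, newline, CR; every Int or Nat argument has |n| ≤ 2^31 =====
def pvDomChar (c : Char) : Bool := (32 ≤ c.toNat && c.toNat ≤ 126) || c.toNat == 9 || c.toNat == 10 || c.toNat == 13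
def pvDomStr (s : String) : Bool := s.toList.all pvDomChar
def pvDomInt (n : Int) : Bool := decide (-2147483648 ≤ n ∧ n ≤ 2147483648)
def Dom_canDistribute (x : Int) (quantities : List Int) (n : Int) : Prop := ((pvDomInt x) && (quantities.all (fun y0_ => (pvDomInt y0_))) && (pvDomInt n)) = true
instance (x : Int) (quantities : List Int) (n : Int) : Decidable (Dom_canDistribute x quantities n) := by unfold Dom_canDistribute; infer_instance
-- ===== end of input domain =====

-- B replaces A's per-store simulation loop (one iteration per store) by a single pass over
-- the products summing closed-form ceiling divisions and comparing the sum with n.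


-- ===== PORT A =====
-- the for _ in range(n) loop with state (i, remaining); fuel = number of remaining iterations;
-- fuel exhausted = loop ended without break ⇒ retVal stays False
def canDistributeLoop (x : Int) (quantities : List Int) (quantitiesSize : Nat) :
    Nat → Nat → Int → Bool
  | 0, _, _ => false
  | fuel + 1, i, remaining =>
    if remaining > x then
      canDistributeLoop x quantities quantitiesSize fuel i (remaining - x)
    else
      let i' := i + 1
      if i' = quantitiesSize then true
      else
        -- quantities[i']: here 0 ≤ i' < quantitiesSize = length, so getD is exact
        canDistributeLoop x quantities quantitiesSize fuel i' (quantities.getD i' 0)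

def canDistribute (x : Int) (quantities : List Int) (n : Int) : Bool :=
  let quantitiesSize := quantities.length
  -- remaining = quantities[0]; IndexError on the empty list is excluded by Pre_
  let remaining := quantities.getD 0 0
  canDistributeLoop x quantities quantitiesSize n.toNat 0 remaining

-- ===== PORT B =====
-- Source B's single pass: accumulate total; early `return False` is the `none` result
def altGo (x : Int) : List Int → Int → Option Int
  | [], total => some total
  | q :: rest, total =>
    if q ≤ x then altGo x rest (total + 1)
    else if x ≤ 0 then none
    else altGo x rest (total + -(PySem.Int.floordiv (-q) x))

def canDistribute_alt (x : Int) (quantities : List Int) (n : Int) : Bool :=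
  match altGo x quantities 0 with
  | none => false
  | some total => decide (total ≤ n)

-- ===== PRECONDITION & SPEC =====
-- Pre_ excludes only the empty list, on which A raises IndexError (quantities[0])
def Pre_canDistribute (x : Int) (quantities : List Int) (n : Int) : Prop := quantities ≠ []
instance (x : Int) (quantities : List Int) (n : Int) : Decidable (Pre_canDistribute x quantities n) := by unfold Pre_canDistribute; infer_instance
def pvWitness_canDistribute : Int × List Int × Int := (2, [5, 3], 5)

def Spec_canDistribute (x : Int) (quantities : List Int) (n : Int) (out : Bool) : Prop := out = canDistribute_alt x quantities n
instance (x : Int) (quantities : List Int) (n : Int) (out : Bool) : Decidable (Spec_canDistribute x quantities n out) := by unfold Spec_canDistribute; infer_instance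

-- ===== CLAIM (what is proved, stated in full; the proofs are below) =====
def Claim_equal_canDistribute : Prop := ∀ (x : Int) (quantities : List Int) (n : Int), Dom_canDistribute x quantities n → Pre_canDistribute x quantities n → Spec_canDistribute x quantities n (canDistribute x quantities n)

-- ===== LEMMAS AND PROOFS =====

-- A's loop with the index replaced by the remaining suffix of the product list
def loopL (x : Int) : Nat → Int → List Int → Bool
  | 0, _, _ => false
  | fuel + 1, remaining, l =>
    if remaining > x then loopL x fuel (remaining - x) l
    else
      match l with
      | [] => true
      | q :: rest => loopL x fuel q rest

-- stores needed for one product with remaining r (assuming it terminates)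
def cee (x r : Int) : Int := if r ≤ x then 1 else -(PySem.Int.floordiv (-r) x)

-- total stores needed for the suffix l, none = B's early False (x ≤ 0 with some q > x)
def costL (x : Int) : List Int → Option Int
  | [] => some 0
  | q :: rest =>
    if q ≤ x ∨ 0 < x then (costL x rest).map (cee x q + ·) else none

def need (x : Int) (r : Int) (l : List Int) : Option Int :=
  if r ≤ x ∨ 0 < x then (costL x l).map (cee x r + ·) else none

theorem cee_pos (x r : Int) (h : r ≤ x ∨ 0 < x) : 1 ≤ cee x r := by
  unfold cee
  split_ifs with hr
  · omega
  · rcases h with h | hx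
    · omega
    · have := (PySem.Int.neg_floordiv_neg_eq_iff_of_pos (a := r) (b := x) (q := 2) hx)
      have h2 : 2 ≤ -(PySem.Int.floordiv (-r) x) := by
        rcases lt_or_ge r (2 * x) with hlt | hge
        · have : -(PySem.Int.floordiv (-r) x) = 2 := by
            rw [PySem.Int.neg_floordiv_neg_eq_iff_of_pos hx]; constructor <;> nlinarith
          omega
        · -- r ≥ 2x: ceiling ≥ 2 via bracket at its own value
          have hq := (PySem.Int.neg_floordiv_neg_eq_iff_of_pos (a := r) (b := x)
            (q := -(PySem.Int.floordiv (-r) x)) hx).mp rfl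
          nlinarith [hq.1, hq.2]
      omega

theorem costL_nonneg (x : Int) (l : List Int) (c : Int) (h : costL x l = some c) : 0 ≤ c := by
  induction l generalizing c with
  | nil => simp [costL] at h; omega
  | cons q rest ih =>
    unfold costL at h
    split_ifs at h with hq
    · rcases Option.map_eq_some_iff.mp h with ⟨b, hb, rfl⟩
      have := ih b hb
      have := cee_pos x q hq
      omega

theorem need_pos (x r : Int) (l : List Int) (c : Int) (h : need x r l = some c) : 1 ≤ c := by
  unfold need at h
  split_ifs at h with hr
  · rcases Option.map_eq_some_iff.mp h with ⟨b, hb, rfl⟩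
    have := costL_nonneg x l b hb
    have := cee_pos x r hr
    omega

-- one subtraction step: the per-product cost drops by exactly 1
theorem cee_step (x r : Int) (hx : 0 < x) (hr : x < r) : cee x (r - x) = cee x r - 1 := by
  unfold cee
  have hnr : ¬ r ≤ x := by omega
  split_ifs with h1
  · -- x < r ≤ 2x ⇒ ceiling r/x = 2
    have : -(PySem.Int.floordiv (-r) x) = 2 := by
      rw [PySem.Int.neg_floordiv_neg_eq_iff_of_pos hx]; constructor <;> nlinarith
    omega
  · -- r - x > x: ceil((r-x)/x) = ceil(r/x) - 1
    have hq := (PySem.Int.neg_floordiv_neg_eq_iff_of_pos (a := r) (b := x)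
      (q := -(PySem.Int.floordiv (-r) x)) hx).mp rfl
    rw [PySem.Int.neg_floordiv_neg_eq_iff_of_pos hx]
    constructor <;> nlinarith [hq.1, hq.2]

theorem loopL_eq_need (x : Int) (fuel : Nat) (r : Int) (l : List Int) :
    loopL x fuel r l = true ↔ ∃ c, need x r l = some c ∧ c ≤ (fuel : Int) := by
  induction fuel generalizing r l with
  | zero =>
    simp only [loopL, Bool.false_eq_true, false_iff]
    rintro ⟨c, hc, hle⟩
    have := need_pos x r l c hc
    omega
  | succ fuel ih =>
    by_cases hr : r > x
    · by_cases hx : 0 < x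
      · -- subtract a store's worth
        have hstep : need x (r - x) l = (need x r l).map (· - 1) := by
          unfold need
          have h1 : (r - x ≤ x ∨ 0 < x) := Or.inr hx
          have h2 : (r ≤ x ∨ 0 < x) := Or.inr hx
          simp only [if_pos h1, if_pos h2, Option.map_map]
          cases costL x l with
          | none => rfl
          | some b => simp [cee_step x r hx hr]; ring
        simp only [loopL, if_pos hr]
        rw [ih]
        constructor
        · rintro ⟨c, hc, hle⟩
          rw [hstep] at hc
          rcases Option.map_eq_some_iff.mp hc with ⟨b, hb, hbe⟩
          exact ⟨b, hb, by omega⟩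
        · rintro ⟨c, hc, hle⟩
          refine ⟨c - 1, ?_, by omega⟩
          rw [hstep, hc]; rfl
      · -- x ≤ 0 and r > x: never terminates; need = none on both levels
        have hnone : ∀ r', x < r' → need x r' l = none := by
          intro r' hr'
          unfold need
          rw [if_neg (by omega)]
        simp only [loopL, if_pos hr]
        rw [ih]
        constructor
        · rintro ⟨c, hc, -⟩
          rw [hnone (r - x) (by omega)] at hc; cases hc
        · rintro ⟨c, hc, -⟩
          rw [hnone r hr] at hc; cases hc
    · -- current product finished: its store is consumed, move on
      have hr' : r ≤ x := by omega
      have hneed : need x r l = (costL x l).map (cee x r + ·) := by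
        unfold need; rw [if_pos (Or.inl hr')]
      have hcee : cee x r = 1 := by unfold cee; rw [if_pos hr']
      cases l with
      | nil =>
        simp only [loopL, if_neg hr, hneed, costL, hcee, Option.map_some]
        constructor
        · intro _
          exact ⟨1 + 0, rfl, by push_cast; omega⟩
        · intro _
          trivial
      | cons q rest =>
        simp only [loopL, if_neg hr]
        rw [ih]
        have hcost : costL x (q :: rest) = need x q rest := by
          unfold costL need; rfl
        rw [hneed, hcost, hcee]
        constructor
        · rintro ⟨c, hc, hle⟩
          exact ⟨1 + c, by rw [hc]; rfl, by omega⟩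
        · rintro ⟨c, hc, hle⟩
          rcases Option.map_eq_some_iff.mp hc with ⟨b, hb, hbe⟩
          exact ⟨b, hb, by omega⟩

-- A's indexed loop equals the suffix-list loop
theorem loop_eq_loopL (x : Int) (qs : List Int) (fuel i : Nat) (r : Int)
    (hi : i < qs.length) :
    canDistributeLoop x qs qs.length fuel i r = loopL x fuel r (qs.drop (i + 1)) := by
  induction fuel generalizing i r with
  | zero => rfl
  | succ fuel ih =>
    simp only [canDistributeLoop, loopL]
    by_cases hr : r > x
    · rw [if_pos hr, if_pos hr, ih i (r - x) hi]
    · rw [if_neg hr, if_neg hr]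
      by_cases he : i + 1 = qs.length
      · rw [if_pos he]
        have : qs.drop (i + 1) = [] := List.drop_eq_nil_of_le (by omega)
        rw [this]
      · rw [if_neg he]
        have hi' : i + 1 < qs.length := by omega
        have hdrop : qs.drop (i + 1) = qs[i + 1] :: qs.drop (i + 2) :=
          List.drop_eq_getElem_cons hi'
        rw [hdrop]
        have hget : qs.getD (i + 1) 0 = qs[i + 1] := List.getD_eq_getElem qs 0 hi'
        rw [hget, ih (i + 1) qs[i + 1] hi']

-- B's accumulator pass equals costL plus the accumulator
theorem altGo_eq_costL (x : Int) (l : List Int) (t : Int) :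
    altGo x l t = (costL x l).map (t + ·) := by
  induction l generalizing t with
  | nil => simp [altGo, costL]
  | cons q rest ih =>
    unfold altGo costL
    by_cases hq : q ≤ x
    · rw [if_pos hq, if_pos (Or.inl hq), ih, Option.map_map]
      have hcee : cee x q = 1 := by unfold cee; rw [if_pos hq]
      cases costL x rest <;> simp [hcee, add_assoc]
    · by_cases hx : x ≤ 0
      · rw [if_neg hq, if_pos hx, if_neg (by omega : ¬ (q ≤ x ∨ 0 < x))]; rfl
      · rw [if_neg hq, if_neg hx, if_pos (Or.inr (by omega)), ih, Option.map_map]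
        have hcee : cee x q = -(PySem.Int.floordiv (-q) x) := by
          unfold cee; rw [if_neg hq]
        cases costL x rest <;> simp [hcee, add_assoc]


-- ===== VERDICT (by name: the statement is the Claim_ definition above) =====
theorem canDistribute_spec : Claim_equal_canDistribute := by
  intro x qs n _ hpre
  unfold Spec_canDistribute canDistribute canDistribute_alt
  cases qs with
  | nil => exact absurd rfl hpre
  | cons q0 rest =>
    simp only
    rw [loop_eq_loopL x (q0 :: rest) n.toNat 0 _ (by simp)]
    have hdrop : (q0 :: rest).drop 1 = rest := rfl
    have hget : (q0 :: rest).getD 0 0 = q0 := rfl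
    rw [hdrop, hget, altGo_eq_costL]
    have hcost : costL x (q0 :: rest) = need x q0 rest := by unfold costL need; rfl
    cases hc : costL x (q0 :: rest) with
    | none =>
      rw [hc] at hcost
      have : loopL x n.toNat q0 rest = false := by
        rw [Bool.eq_false_iff]
        intro h
        rcases (loopL_eq_need x n.toNat q0 rest).mp h with ⟨c, hcn, -⟩
        rw [← hcost] at hcn; cases hcn
      simp [this]
    | some c =>
      rw [hc] at hcost
      have hpos : 1 ≤ c := need_pos x q0 rest c hcost.symm
      have key : loopL x n.toNat q0 rest = true ↔ c ≤ n := by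
        rw [loopL_eq_need]
        constructor
        · rintro ⟨c', hc', hle⟩
          rw [← hcost] at hc'
          have : c' = c := by cases hc'; rfl
          omega
        · intro h
          exact ⟨c, hcost.symm, by omega⟩
      have heq : loopL x n.toNat q0 rest = decide (c ≤ n) := by
        rw [Bool.eq_iff_iff]
        simp [key]
      rw [heq]
      simp only [Option.map_some]
      norm_num
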